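-- pv_equiv track=rewrite | github.com/naveenkewalramani/dsa-solutions | interview_questions/zalando/zalando_sde2_round1.py | replaceQuestionMark
-- ===== SOURCE A (Python) =====
-- def replaceQuestionMark(inputStr):
--     inputStrToList = list(inputStr)
--     n = len(inputStr)
--     for i in range(n//2):
--         left = inputStrToList[i]
--         right = inputStrToList[n-i-1]
--         if left == "?" and right == "?":
--             inputStrToList[i] = inputStrToList[n-i-1] = "a"
--         elif left == "?":
--             inputStrToList[i] = right
--         elif right == "?":
--             inputStrToList[n-i-1] = left
--         elif left != right:
--             return "NO"
--
--     if n %2 == 1 and inputStrToList[n//2] == "?":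
--         inputStrToList[n//2] = "a"
--
--     return ''.join(inputStrToList)
-- ===== SOURCE B (Python) =====
-- def replaceQuestionMark(inputStr):
--     s = list(inputStr)
--     n = len(s)
--     res = [s[i] if s[i] != '?' else (s[n - 1 - i] if s[n - 1 - i] != '?' else 'a')
--            for i in range(n)]
--     if res != res[::-1]:
--         return "NO"
--     return ''.join(res)
-- ===== Notes on version B (the rewrite author's own statement) =====
-- stated objective: simpler
-- what changed: Replaces the stateful half-scan that interleaves mutation with conflict detection by a single comprehension filling every position from its mirror (doubly-unknown pairs become 'a') followed by a separate palindrome validation pass that reports failure.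
import Mathlib
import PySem

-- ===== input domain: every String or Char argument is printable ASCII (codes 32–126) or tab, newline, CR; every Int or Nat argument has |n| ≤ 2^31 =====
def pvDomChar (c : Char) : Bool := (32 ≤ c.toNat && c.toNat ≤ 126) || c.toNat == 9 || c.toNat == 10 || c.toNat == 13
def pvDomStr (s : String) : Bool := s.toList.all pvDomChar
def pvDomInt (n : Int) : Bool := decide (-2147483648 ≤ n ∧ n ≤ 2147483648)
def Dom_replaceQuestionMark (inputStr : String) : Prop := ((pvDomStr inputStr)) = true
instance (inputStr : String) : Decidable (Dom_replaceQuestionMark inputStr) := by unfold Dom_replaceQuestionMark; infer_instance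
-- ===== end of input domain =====

-- B fills every position from its mirror in one comprehension and then validates with a
-- separate palindrome check, instead of A's half-scan that interleaves mutation with
-- conflict detection (objective: simpler).

-- ===== PORT A =====
-- A's for-loop: mutates the list pair by pair, early-returns none ("NO") on a conflict
-- (Python's left/right locals are inlined). All Python indexing in A is with indices
-- provably in range, so List.getD is exact here.
def pvLoopA (n : Nat) (s : List Char) (i : Nat) : Option (List Char) :=
  if _h : i < n / 2 then
    if s.getD i 'a' = '?' ∧ s.getD (n - i - 1) 'a' = '?' then
      pvLoopA n ((s.set i 'a').set (n - i - 1) 'a') (i + 1)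
    else if s.getD i 'a' = '?' then
      pvLoopA n (s.set i (s.getD (n - i - 1) 'a')) (i + 1)
    else if s.getD (n - i - 1) 'a' = '?' then
      pvLoopA n (s.set (n - i - 1) (s.getD i 'a')) (i + 1)
    else if s.getD i 'a' ≠ s.getD (n - i - 1) 'a' then
      none
    else
      pvLoopA n s (i + 1)
  else
    some s
termination_by n / 2 - i

def replaceQuestionMark (inputStr : String) : String :=
  let l := inputStr.toList
  let n := l.length
  match pvLoopA n l 0 with
  | none => "NO"
  | some s =>
    let s := if n % 2 = 1 ∧ s.getD (n / 2) 'a' = '?' then s.set (n / 2) 'a' else s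
    String.ofList s

-- ===== PORT B =====
def replaceQuestionMark_alt (inputStr : String) : String :=
  let s := inputStr.toList
  let n := s.length
  let res := (List.range n).map (fun i =>
    if s.getD i 'a' ≠ '?' then s.getD i 'a'
    else if s.getD (n - 1 - i) 'a' ≠ '?' then s.getD (n - 1 - i) 'a'
    else 'a')
  if res ≠ res.reverse then "NO" else String.ofList res

-- ===== PRECONDITION & SPEC =====
def Spec_replaceQuestionMark (inputStr : String) (out : String) : Prop := out = replaceQuestionMark_alt inputStr
instance (inputStr : String) (out : String) : Decidable (Spec_replaceQuestionMark inputStr out) := by unfold Spec_replaceQuestionMark; infer_instance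

-- ===== CLAIM (what is proved, stated in full; the proofs are below) =====
def Claim_equal_replaceQuestionMark : Prop := ∀ (inputStr : String), Dom_replaceQuestionMark inputStr → Spec_replaceQuestionMark inputStr (replaceQuestionMark inputStr)

-- ===== LEMMAS AND PROOFS =====

-- the fill value B computes at position j
def pvFill (l : List Char) (n j : Nat) : Char :=
  if l.getD j 'a' ≠ '?' then l.getD j 'a'
  else if l.getD (n - 1 - j) 'a' ≠ '?' then l.getD (n - 1 - j) 'a'
  else 'a'

-- a genuine conflict at pair j (both fixed, different)
abbrev pvConf (l : List Char) (n j : Nat) : Prop :=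
  l.getD j 'a' ≠ '?' ∧ l.getD (n - 1 - j) 'a' ≠ '?' ∧ l.getD j 'a' ≠ l.getD (n - 1 - j) 'a'

theorem pvGetD_set (s : List Char) (a j : Nat) (c d : Char) :
    (s.set a c).getD j d = if a = j ∧ a < s.length then c else s.getD j d := by
  simp only [List.getD_eq_getElem?_getD, List.getElem?_set]
  split_ifs with h1 h2 h3 <;> simp_all
  omega

theorem pvGetD_map_range (f : Nat → Char) (n j : Nat) (h : j < n) (d : Char) :
    ((List.range n).map f).getD j d = f j := by
  rw [List.getD_eq_getElem?_getD]
  simp [h]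

theorem pvFill_symm (l : List Char) (n : Nat) (hn : n = l.length)
    (hc : ∀ m, m < n / 2 → ¬ pvConf l n m) (j : Nat) (hj : j < n) :
    pvFill l n (n - 1 - j) = pvFill l n j := by
  have hjj : n - 1 - (n - 1 - j) = j := by omega
  by_cases h : j = n - 1 - j
  · rw [← h]
  · unfold pvFill
    rw [hjj]
    split_ifs with t1 t2 t3 <;> try tauto
    -- both fixed: no conflict at the smaller index forces equality
    rcases Nat.lt_or_ge j (n - 1 - j) with hlt | hge
    · have hno := hc j (by omega)
      simp only [pvConf, not_and_or, not_not] at hno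
      tauto
    · have hno := hc (n - 1 - j) (by omega)
      simp only [pvConf, not_and_or, not_not] at hno
      rw [hjj] at hno
      tauto

theorem pvLoopA_spec (l : List Char) (n : Nat) (hn : n = l.length) :
    ∀ k i (s : List Char), i + k = n / 2 → s.length = n →
      (∀ j, j < n → (i ≤ j → j ≤ n - 1 - i → s.getD j 'a' = l.getD j 'a')) →
      (∀ j, j < n → (j < i ∨ n - 1 - i < j) → s.getD j 'a' = pvFill l n j) →
      (if ∀ m, m < n / 2 → i ≤ m → ¬ pvConf l n m then
        ∃ r, pvLoopA n s i = some r ∧ r.length = n ∧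
          ∀ j, j < n → (j ≠ n / 2 ∨ n % 2 = 0 → r.getD j 'a' = pvFill l n j) ∧
            (j = n / 2 → n % 2 = 1 → r.getD j 'a' = l.getD j 'a')
      else pvLoopA n s i = none) := by
  intro k
  induction k with
  | zero =>
    intro i s hik hlen h1 h2
    have hi : ¬ i < n / 2 := by omega
    rw [pvLoopA, dif_neg hi]
    rw [if_pos (by intro m hm him; omega)]
    refine ⟨s, rfl, hlen, ?_⟩
    intro j hj
    constructor
    · intro hcase
      by_cases hlt : j < i
      · exact h2 j hj (Or.inl hlt)
      by_cases hgt : n - 1 - i < j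
      · exact h2 j hj (Or.inr hgt)
      · exfalso; rcases hcase with h | h <;> omega
    · intro hj2 hodd
      exact h1 j hj (by omega) (by omega)
  | succ k ih =>
    intro i s hik hlen h1 h2
    have hi : i < n / 2 := by omega
    have hin : i < n := by omega
    have hmi : i < n - 1 - i := by omega
    have hl : s.getD i 'a' = l.getD i 'a' := h1 i hin (le_refl _) (by omega)
    have hr : s.getD (n - i - 1) 'a' = l.getD (n - 1 - i) 'a' := by
      rw [show n - i - 1 = n - 1 - i by omega]
      exact h1 (n - 1 - i) (by omega) (by omega) (by omega)
    have condsplit : (∀ m, m < n / 2 → i ≤ m → ¬ pvConf l n m) ↔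
        (¬ pvConf l n i ∧ ∀ m, m < n / 2 → i + 1 ≤ m → ¬ pvConf l n m) := by
      constructor
      · exact fun h => ⟨h i hi (le_refl _), fun m hm him => h m hm (by omega)⟩
      · rintro ⟨h0, h⟩ m hm him
        rcases Nat.eq_or_lt_of_le him with rfl | h'
        · exact h0
        · exact h m hm h'
    rw [pvLoopA, dif_pos hi]
    by_cases hql : s.getD i 'a' = '?' <;> by_cases hqr : s.getD (n - i - 1) 'a' = '?'
    · -- both '?': set both to 'a'
      have hqlL : l.getD i 'a' = '?' := by rw [← hl]; exact hql
      have hqrL : l.getD (n - 1 - i) 'a' = '?' := by rw [← hr]; exact hqr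
      have hnoc : ¬ pvConf l n i := fun h => h.1 hqlL
      have H := ih (i + 1) ((s.set i 'a').set (n - i - 1) 'a') (by omega)
        (by simp [hlen])
        (by
          intro j hj hj1 hj2
          rw [pvGetD_set, if_neg (by rintro ⟨h, -⟩; omega),
            pvGetD_set, if_neg (by rintro ⟨h, -⟩; omega)]
          exact h1 j hj (by omega) (by omega))
        (by
          intro j hj hcase
          by_cases hji : j = i
          · subst hji
            rw [pvGetD_set, if_neg (by rintro ⟨h, -⟩; omega),
              pvGetD_set, if_pos ⟨rfl, by omega⟩]
            unfold pvFill
            rw [if_neg (not_not_intro hqlL), if_neg (not_not_intro hqrL)]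
          by_cases hjm : j = n - i - 1
          · subst hjm
            rw [pvGetD_set, if_pos ⟨rfl, by rw [List.length_set]; omega⟩]
            unfold pvFill
            rw [show n - i - 1 = n - 1 - i by omega,
              show n - 1 - (n - 1 - i) = i by omega,
              if_neg (not_not_intro hqrL), if_neg (not_not_intro hqlL)]
          · rw [pvGetD_set, if_neg (by rintro ⟨h, -⟩; omega),
              pvGetD_set, if_neg (by rintro ⟨h, -⟩; omega)]
            exact h2 j hj (by omega))
      by_cases hc : ∀ m, m < n / 2 → i + 1 ≤ m → ¬ pvConf l n m
      · rw [if_pos (condsplit.mpr ⟨hnoc, hc⟩), if_pos ⟨hql, hqr⟩]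
        rw [if_pos hc] at H; exact H
      · rw [if_neg (fun h => hc (condsplit.mp h).2), if_pos ⟨hql, hqr⟩]
        rw [if_neg hc] at H; exact H
    · -- left '?': copy right
      have hqlL : l.getD i 'a' = '?' := by rw [← hl]; exact hql
      have hqrL : l.getD (n - 1 - i) 'a' ≠ '?' := by rw [← hr]; exact hqr
      have hnoc : ¬ pvConf l n i := fun h => h.1 hqlL
      have H := ih (i + 1) (s.set i (s.getD (n - i - 1) 'a')) (by omega)
        (by simp [hlen])
        (by
          intro j hj hj1 hj2
          rw [pvGetD_set, if_neg (by rintro ⟨h, -⟩; omega)]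
          exact h1 j hj (by omega) (by omega))
        (by
          intro j hj hcase
          by_cases hji : j = i
          · subst hji
            rw [pvGetD_set, if_pos ⟨rfl, by omega⟩, hr]
            unfold pvFill
            rw [if_neg (not_not_intro hqlL), if_pos hqrL]
          by_cases hjm : j = n - i - 1
          · subst hjm
            rw [pvGetD_set, if_neg (by rintro ⟨h, -⟩; omega), hr,
              show n - i - 1 = n - 1 - i by omega]
            unfold pvFill
            rw [if_pos hqrL]
          · rw [pvGetD_set, if_neg (by rintro ⟨h, -⟩; omega)]
            exact h2 j hj (by omega))
      by_cases hc : ∀ m, m < n / 2 → i + 1 ≤ m → ¬ pvConf l n m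
      · rw [if_pos (condsplit.mpr ⟨hnoc, hc⟩),
          if_neg (show ¬(s.getD i 'a' = '?' ∧ s.getD (n - i - 1) 'a' = '?') by
            rintro ⟨-, h⟩; exact hqr h), if_pos hql]
        rw [if_pos hc] at H; exact H
      · rw [if_neg (fun h => hc (condsplit.mp h).2),
          if_neg (show ¬(s.getD i 'a' = '?' ∧ s.getD (n - i - 1) 'a' = '?') by
            rintro ⟨-, h⟩; exact hqr h), if_pos hql]
        rw [if_neg hc] at H; exact H
    · -- right '?': copy left
      have hqlL : l.getD i 'a' ≠ '?' := by rw [← hl]; exact hql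
      have hqrL : l.getD (n - 1 - i) 'a' = '?' := by rw [← hr]; exact hqr
      have hnoc : ¬ pvConf l n i := fun h => h.2.1 hqrL
      have H := ih (i + 1) (s.set (n - i - 1) (s.getD i 'a')) (by omega)
        (by simp [hlen])
        (by
          intro j hj hj1 hj2
          rw [pvGetD_set, if_neg (by rintro ⟨h, -⟩; omega)]
          exact h1 j hj (by omega) (by omega))
        (by
          intro j hj hcase
          by_cases hji : j = i
          · subst hji
            rw [pvGetD_set, if_neg (by rintro ⟨h, -⟩; omega), hl]
            unfold pvFill
            rw [if_pos hqlL]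
          by_cases hjm : j = n - i - 1
          · subst hjm
            rw [pvGetD_set, if_pos ⟨rfl, by omega⟩, hl,
              show n - i - 1 = n - 1 - i by omega]
            unfold pvFill
            rw [if_neg (not_not_intro hqrL), show n - 1 - (n - 1 - i) = i by omega,
              if_pos hqlL]
          · rw [pvGetD_set, if_neg (by rintro ⟨h, -⟩; omega)]
            exact h2 j hj (by omega))
      by_cases hc : ∀ m, m < n / 2 → i + 1 ≤ m → ¬ pvConf l n m
      · rw [if_pos (condsplit.mpr ⟨hnoc, hc⟩),
          if_neg (show ¬(s.getD i 'a' = '?' ∧ s.getD (n - i - 1) 'a' = '?') by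
            rintro ⟨h, -⟩; exact hql h), if_neg hql, if_pos hqr]
        rw [if_pos hc] at H; exact H
      · rw [if_neg (fun h => hc (condsplit.mp h).2),
          if_neg (show ¬(s.getD i 'a' = '?' ∧ s.getD (n - i - 1) 'a' = '?') by
            rintro ⟨h, -⟩; exact hql h), if_neg hql, if_pos hqr]
        rw [if_neg hc] at H; exact H
    · -- both fixed
      have hqlL : l.getD i 'a' ≠ '?' := by rw [← hl]; exact hql
      have hqrL : l.getD (n - 1 - i) 'a' ≠ '?' := by rw [← hr]; exact hqr
      by_cases hne : s.getD i 'a' = s.getD (n - i - 1) 'a'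
      · -- equal: no change, recurse
        have hneL : l.getD i 'a' = l.getD (n - 1 - i) 'a' := by
          rw [← hl, ← hr]; exact hne
        have hnoc : ¬ pvConf l n i := fun h => h.2.2 hneL
        have H := ih (i + 1) s (by omega) hlen
          (fun j hj hj1 hj2 => h1 j hj (by omega) (by omega))
          (by
            intro j hj hcase
            by_cases hji : j = i
            · subst hji
              rw [hl]
              unfold pvFill
              rw [if_pos hqlL]
            by_cases hjm : j = n - i - 1
            · subst hjm
              rw [hr, show n - i - 1 = n - 1 - i by omega]
              unfold pvFill
              rw [if_pos hqrL]
            · exact h2 j hj (by omega))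
        by_cases hc : ∀ m, m < n / 2 → i + 1 ≤ m → ¬ pvConf l n m
        · rw [if_pos (condsplit.mpr ⟨hnoc, hc⟩),
            if_neg (show ¬(s.getD i 'a' = '?' ∧ s.getD (n - i - 1) 'a' = '?') by
              rintro ⟨h, -⟩; exact hql h), if_neg hql, if_neg hqr,
            if_neg (not_not_intro hne)]
          rw [if_pos hc] at H; exact H
        · rw [if_neg (fun h => hc (condsplit.mp h).2),
            if_neg (show ¬(s.getD i 'a' = '?' ∧ s.getD (n - i - 1) 'a' = '?') by
              rintro ⟨h, -⟩; exact hql h), if_neg hql, if_neg hqr,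
            if_neg (not_not_intro hne)]
          rw [if_neg hc] at H; exact H
      · -- conflict
        have hconf : pvConf l n i :=
          ⟨hqlL, hqrL, by rw [← hl, ← hr]; exact hne⟩
        rw [if_neg (show ¬(∀ m, m < n / 2 → i ≤ m → ¬ pvConf l n m) by
            intro h; exact (condsplit.mp h).1 hconf),
          if_neg (show ¬(s.getD i 'a' = '?' ∧ s.getD (n - i - 1) 'a' = '?') by
            rintro ⟨h, -⟩; exact hql h), if_neg hql, if_neg hqr, if_pos hne]

-- two lists of the same length with equal getD everywhere are equal
theorem pvList_ext (x y : List Char) (h : x.length = y.length)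
    (hj : ∀ j, j < x.length → x.getD j 'a' = y.getD j 'a') : x = y := by
  apply List.ext_getElem h
  intro j h1 h2
  have := hj j h1
  rwa [List.getD_eq_getElem x 'a' h1, List.getD_eq_getElem y 'a' h2] at this

-- ===== VERDICT (by name: the statement is the Claim_ definition above) =====
theorem replaceQuestionMark_spec : Claim_equal_replaceQuestionMark := by
  unfold Claim_equal_replaceQuestionMark
  intro inp _
  unfold Spec_replaceQuestionMark
  simp only [replaceQuestionMark, replaceQuestionMark_alt]
  set l := inp.toList with hldef
  set n := l.length with hn
  have hfun : (fun i => if l.getD i 'a' ≠ '?' then l.getD i 'a'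
      else if l.getD (n - 1 - i) 'a' ≠ '?' then l.getD (n - 1 - i) 'a' else 'a') = pvFill l n := by
    funext i; rfl
  rw [hfun]
  have hres_len : ((List.range n).map (pvFill l n)).length = n := by simp
  have H := pvLoopA_spec l n hn (n / 2) 0 l (by omega) rfl
    (fun j hj _ _ => rfl)
    (fun j hj hcase => by omega)
  by_cases hc : ∀ m, m < n / 2 → 0 ≤ m → ¬ pvConf l n m
  · -- no conflict: both build the same palindrome
    rw [if_pos hc] at H
    obtain ⟨r, hr1, hr2, hr3⟩ := H
    have hc' : ∀ m, m < n / 2 → ¬ pvConf l n m := fun m hm => hc m hm (by omega)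
    have hpal : ((List.range n).map (pvFill l n)).reverse = (List.range n).map (pvFill l n) := by
      apply List.ext_getElem (by simp)
      intro j hj1 hj2
      rw [List.getElem_reverse]
      simp only [List.getElem_map, List.getElem_range, List.length_map, List.length_range]
      exact pvFill_symm l n hn hc' j (by simpa using hj2)
    rw [if_neg (by simp [hpal]), hr1]
    show String.ofList (if n % 2 = 1 ∧ r.getD (n / 2) 'a' = '?' then r.set (n / 2) 'a' else r)
      = String.ofList ((List.range n).map (pvFill l n))
    congr 1
    by_cases hodd : n % 2 = 1 ∧ r.getD (n / 2) 'a' = '?'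
    · rw [if_pos hodd]
      apply pvList_ext _ _ (by simp [hr2])
      intro j hj
      simp only [List.length_set, hr2] at hj
      rw [pvGetD_set, pvGetD_map_range _ _ _ hj]
      by_cases hjm : j = n / 2
      · subst hjm
        rw [if_pos ⟨rfl, by omega⟩]
        have hmid := (hr3 _ hj).2 rfl hodd.1
        have hq : l.getD (n / 2) 'a' = '?' := by rw [← hmid]; exact hodd.2
        unfold pvFill
        rw [show n - 1 - n / 2 = n / 2 by omega, if_neg (not_not_intro hq),
          if_neg (not_not_intro hq)]
      · rw [if_neg (by rintro ⟨h, -⟩; exact hjm h.symm)]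
        exact (hr3 j hj).1 (Or.inl hjm)
    · rw [if_neg hodd]
      apply pvList_ext _ _ (by simp [hr2])
      intro j hj
      rw [hr2] at hj
      rw [pvGetD_map_range _ _ _ hj]
      by_cases hjm : j = n / 2
      · rcases Nat.even_or_odd n with he | ho
        · exact (hr3 j hj).1 (Or.inr (Nat.even_iff.mp he))
        · subst hjm
          have hmid := (hr3 _ hj).2 rfl (Nat.odd_iff.mp ho)
          have hq : r.getD (n / 2) 'a' ≠ '?' := fun h => hodd ⟨Nat.odd_iff.mp ho, h⟩
          rw [hmid] at hq
          rw [hmid]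
          unfold pvFill
          rw [if_pos hq]
      · exact (hr3 j hj).1 (Or.inl hjm)
  · -- conflict: both return "NO"
    rw [if_neg hc] at H
    push Not at hc
    obtain ⟨m, hm, -, hconf⟩ := hc
    have hmn : m < n := by omega
    have hmm : n - 1 - m < n := by omega
    have hneq : (List.range n).map (pvFill l n) ≠ ((List.range n).map (pvFill l n)).reverse := by
      intro heq
      have h1 : ((List.range n).map (pvFill l n)).getD m 'a'
          = (((List.range n).map (pvFill l n)).reverse).getD m 'a' := by
        conv_lhs => rw [heq]
      rw [pvGetD_map_range _ _ _ hmn, List.getD_eq_getElem?_getD,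
        List.getElem?_reverse (by rw [hres_len]; exact hmn), hres_len,
        ← List.getD_eq_getElem?_getD, pvGetD_map_range _ _ _ hmm] at h1
      obtain ⟨hq1, hq2, hq3⟩ := hconf
      unfold pvFill at h1
      rw [if_pos hq1,
        if_pos (show l.getD (n - 1 - m) 'a' ≠ '?' from hq2)] at h1
      exact hq3 h1
    rw [H, if_pos hneq]
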